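-- pv_equiv track=rewrite | github.com/erdenebayrd/leetcode | 2387-partition-array-such-that-maximum-difference-is-k/2387-partition-array-such-that-maximum-difference-is-k.py | partitionArray
-- ===== SOURCE A (Python) =====
-- from typing import List
--
-- def partitionArray(nums: List[int], k: int) -> int:
--     nums.sort()
--     res = 1
--     cur = nums[0]
--     for x in nums:
--         if x - cur <= k:
--             continue
--         res += 1
--         cur = x
--     return res
-- ===== SOURCE B (Python) =====
-- def partitionArray(nums, k):
--     nums.sort()
--     n = len(nums)
--     res = 0
--     i = 0
--     while i < n:
--         res += 1
--         t = nums[i] + k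
--         lo, hi = i + 1, n
--         while lo < hi:
--             mid = (lo + hi) // 2
--             if nums[mid] <= t:
--                 lo = mid + 1
--             else:
--                 hi = mid
--         i = lo
--     return res
-- ===== Notes on version B (the rewrite author's own statement) =====
-- stated objective: alternative
-- what changed: Replaces A's flat anchor-tracking linear scan with an outer loop over group boundaries that advances past each group by a hand-written binary search for the first element exceeding the group's minimum plus k.
-- intended difference: For negative k (and nonempty nums) A returns len(nums)+1 because its anchor test fails even on the first element it initialised from, while B returns len(nums) (one singleton group per element), the intended minimal partition count. — e.g. on partitionArray([3], -1): A returns 2, B returns 1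
import Mathlib
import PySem

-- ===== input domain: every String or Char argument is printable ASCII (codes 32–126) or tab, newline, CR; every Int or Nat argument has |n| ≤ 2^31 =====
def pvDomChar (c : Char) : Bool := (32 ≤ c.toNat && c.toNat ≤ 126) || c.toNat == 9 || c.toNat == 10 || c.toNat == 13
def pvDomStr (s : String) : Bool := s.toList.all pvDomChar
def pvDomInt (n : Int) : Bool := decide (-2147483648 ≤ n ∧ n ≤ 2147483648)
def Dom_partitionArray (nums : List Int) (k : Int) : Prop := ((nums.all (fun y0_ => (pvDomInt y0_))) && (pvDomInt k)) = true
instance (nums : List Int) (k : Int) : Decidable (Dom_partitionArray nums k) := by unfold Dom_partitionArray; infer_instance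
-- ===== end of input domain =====

-- B replaces A's flat anchor-tracking scan with an outer loop over group boundaries that
-- jumps past each group by a hand-written binary search (alternative decomposition).
-- A sorts nums in place; B performs the same in-place sort; the equivalence proved is about the return value.

-- ===== PORT A =====
def partitionArray (nums : List Int) (k : Int) : Int :=
  let s := PySem.List.sorted nums (fun x => x) false
  match s with
  | [] => 0  -- Python raises IndexError at nums[0] here; excluded by Pre_partitionArray
  | c :: _ =>
    (s.foldl (fun (st : Int × Int) x => if x - st.2 ≤ k then st else (st.1 + 1, x)) (1, c)).1

-- ===== PORT B =====
-- two arithmetic facts about the midpoint, cited by bsearch's decreasing_by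
theorem pvHalfLt (lo hi : Nat) (h : lo < hi) : (lo + hi) / 2 < hi :=
  Nat.div_lt_of_lt_mul (by omega)
theorem pvHalfGe (lo hi : Nat) (h : lo < hi) : lo ≤ (lo + hi) / 2 :=
  Nat.le_div_iff_mul_le (by omega) |>.mpr (by omega)

-- inner `while lo < hi: mid = (lo+hi)//2; if nums[mid] <= t: lo = mid+1 else: hi = mid`;
-- indices are in-range Nats, so List.getD is exact for Python's nums[mid] here,
-- and (lo+hi)//2 on nonnegative ints is Nat division.
def bsearch (s : List Int) (t : Int) (lo hi : Nat) : Nat :=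
  if lo < hi then
    let mid := (lo + hi) / 2
    if s.getD mid 0 ≤ t then bsearch s t (mid + 1) hi
    else bsearch s t lo mid
  else lo
termination_by hi - lo
decreasing_by
  · exact Nat.sub_lt_sub_left (by assumption) (Nat.lt_succ_of_le (pvHalfGe lo hi (by assumption)))
  · exact Nat.sub_lt_sub_right (pvHalfGe lo hi (by assumption)) (pvHalfLt lo hi (by assumption))

-- termination of the outer loop: the binary search never moves left (cited in decreasing_by)
theorem bsearch_ge (s : List Int) (t : Int) (lo hi : Nat) : lo ≤ bsearch s t lo hi := by
  fun_induction bsearch s t lo hi with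
  | case1 lo hi h1 mid h2 ih => omega
  | case2 lo hi h1 mid h2 ih => omega
  | case3 lo hi h1 => omega

-- outer `while i < n: res += 1; t = nums[i] + k; <binary search>; i = lo`
def outerB (s : List Int) (k : Int) (n i : Nat) (res : Int) : Int :=
  if i < n then outerB s k n (bsearch s (s.getD i 0 + k) (i + 1) n) (res + 1)
  else res
termination_by n - i
decreasing_by
  have := bsearch_ge s (s.getD i 0 + k) (i + 1) n
  omega

def partitionArray_alt (nums : List Int) (k : Int) : Int :=
  let s := PySem.List.sorted nums (fun x => x) false
  outerB s k s.length 0 0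

-- ===== PRECONDITION & SPEC =====
-- A reads nums[0] after sorting and so raises IndexError on the empty list; Pre_ excludes exactly that.
def Pre_partitionArray (nums : List Int) (k : Int) : Prop := nums ≠ []
instance (nums : List Int) (k : Int) : Decidable (Pre_partitionArray nums k) := by unfold Pre_partitionArray; infer_instance
def pvWitness_partitionArray : List Int × Int := ([1, 4, 7], 2)

-- For negative k (nums nonempty) A returns len(nums)+1 — its anchor test fails even on the first
-- element it initialised the anchor from — while B returns len(nums), one singleton group per
-- element, the intended minimal partition count.
def D_partitionArray (nums : List Int) (k : Int) : Prop := nums ≠ [] ∧ k < 0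
instance (nums : List Int) (k : Int) : Decidable (D_partitionArray nums k) := by unfold D_partitionArray; infer_instance

def Spec_partitionArray (nums : List Int) (k : Int) (out : Int) : Prop := ¬ D_partitionArray nums k → out = partitionArray_alt nums k
instance (nums : List Int) (k : Int) (out : Int) : Decidable (Spec_partitionArray nums k out) := by unfold Spec_partitionArray; infer_instance

def pvDiffWitness_partitionArray : List Int × Int := ([3], -1)
def pvDiffWitnessOut_partitionArray : Int × Int := (2, 1)

-- ===== CLAIM (what is proved, stated in full; the proofs are below) =====
def Claim_unchanged_partitionArray : Prop := ∀ (nums : List Int) (k : Int), Dom_partitionArray nums k → Pre_partitionArray nums k → Spec_partitionArray nums k (partitionArray nums k)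
def Claim_changed_partitionArray : Prop := Dom_partitionArray (pvDiffWitness_partitionArray.1) (pvDiffWitness_partitionArray.2) ∧ Pre_partitionArray (pvDiffWitness_partitionArray.1) (pvDiffWitness_partitionArray.2) ∧ D_partitionArray (pvDiffWitness_partitionArray.1) (pvDiffWitness_partitionArray.2) ∧ partitionArray (pvDiffWitness_partitionArray.1) (pvDiffWitness_partitionArray.2) = pvDiffWitnessOut_partitionArray.1 ∧ partitionArray_alt (pvDiffWitness_partitionArray.1) (pvDiffWitness_partitionArray.2) = pvDiffWitnessOut_partitionArray.2 ∧ pvDiffWitnessOut_partitionArray.1 ≠ pvDiffWitnessOut_partitionArray.2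
def Claim_exact_partitionArray : Prop := ∀ (nums : List Int) (k : Int), Dom_partitionArray nums k → Pre_partitionArray nums k → D_partitionArray nums k → partitionArray nums k ≠ partitionArray_alt nums k

-- ===== LEMMAS AND PROOFS =====

-- A's loop body as a named fold (proof-side only)
def foldA (k : Int) (l : List Int) (st : Int × Int) : Int × Int :=
  l.foldl (fun st x => if x - st.2 ≤ k then st else (st.1 + 1, x)) st

theorem foldA_shift (k : Int) (l : List Int) : ∀ (r : Int) (x : Int),
    foldA k l (r + 1, x) = ((foldA k l (r, x)).1 + 1, (foldA k l (r, x)).2) := by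
  induction l with
  | nil => intro r x; simp [foldA]
  | cons y l ih =>
    intro r x
    simp only [foldA, List.foldl_cons]
    by_cases h : y - x ≤ k
    · rw [if_pos h, if_pos h]
      have := ih r x
      simp only [foldA] at this
      exact this
    · rw [if_neg h, if_neg h]
      have := ih (r + 1) y
      simp only [foldA] at this
      exact this

-- proof-side linear boundary scan: the first index j ≥ start (bounded by n) with s[j] - b > k
def linScan (s : List Int) (k b : Int) (n j : Nat) : Nat :=
  if j < n then
    if s.getD j 0 - b ≤ k then linScan s k b n (j + 1) else j
  else j
termination_by n - j

theorem linScan_ge (s : List Int) (k b : Int) (n j : Nat) : j ≤ linScan s k b n j := by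
  fun_induction linScan s k b n j with
  | case1 j h1 h2 ih => omega
  | case2 j h1 h2 => omega
  | case3 j h1 => omega

theorem linScan_le (s : List Int) (k b : Int) (n j : Nat) (hj : j ≤ n) :
    linScan s k b n j ≤ n := by
  fun_induction linScan s k b n j with
  | case1 j h1 h2 ih => exact ih (by omega)
  | case2 j h1 h2 => omega
  | case3 j h1 => omega

theorem linScan_stop (s : List Int) (k b : Int) (n j : Nat)
    (h : linScan s k b n j < n) : ¬ (s.getD (linScan s k b n j) 0 - b ≤ k) := by
  fun_induction linScan s k b n j with
  | case1 j h1 h2 ih => exact ih h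
  | case2 j h1 h2 => exact h2
  | case3 j h1 => omega

theorem linScan_mem (s : List Int) (k b : Int) (n j : Nat) :
    ∀ m, j ≤ m → m < linScan s k b n j → s.getD m 0 - b ≤ k := by
  fun_induction linScan s k b n j with
  | case1 j h1 h2 ih =>
    intro m hm1 hm2
    rcases Nat.eq_or_lt_of_le hm1 with h | h
    · exact h ▸ h2
    · exact ih m h hm2
  | case2 j h1 h2 => intro m hm1 hm2; omega
  | case3 j h1 => intro m hm1 hm2; omega

theorem linScan_skip (s : List Int) (k b : Int) (j : Nat) (r : Int) :
    foldA k (s.drop j) (r, b) = foldA k (s.drop (linScan s k b s.length j)) (r, b) := by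
  fun_induction linScan s k b s.length j with
  | case1 j h1 h2 ih =>
    rw [List.drop_eq_getElem_cons h1]
    simp only [foldA, List.foldl_cons]
    rw [List.getD_eq_getElem s 0 h1] at h2
    rw [if_pos h2]
    simp only [foldA] at ih
    exact ih
  | case2 j h1 h2 => rfl
  | case3 j h1 => rfl

theorem bsearch_le (s : List Int) (t : Int) (lo hi : Nat) (h : lo ≤ hi) :
    bsearch s t lo hi ≤ hi := by
  fun_induction bsearch s t lo hi with
  | case1 lo hi h1 mid h2 ih => exact ih (by omega)
  | case2 lo hi h1 mid h2 ih => have := ih (by omega); omega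
  | case3 lo hi h1 => omega

-- below the result of the binary search, every element is ≤ t (needs sortedness)
theorem bsearch_below (s : List Int) (t : Int) (lo hi : Nat)
    (hs : s.Pairwise (· ≤ ·)) (hhi : hi ≤ s.length) :
    ∀ m, lo ≤ m → m < bsearch s t lo hi → s.getD m 0 ≤ t := by
  fun_induction bsearch s t lo hi with
  | case1 lo hi h1 mid h2 ih =>
    intro m hm1 hm2
    by_cases hmid : m ≤ mid
    · have hmlen : m < s.length := by omega
      have hmidlen : mid < s.length := by omega
      rw [List.getD_eq_getElem s 0 hmlen]
      rw [List.getD_eq_getElem s 0 hmidlen] at h2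
      rcases Nat.eq_or_lt_of_le hmid with h | h
      · simp only [h]; exact h2
      · exact le_trans (List.pairwise_iff_getElem.mp hs m mid hmlen hmidlen h) h2
    · exact ih hhi m (by omega) hm2
  | case2 lo hi h1 mid h2 ih => exact ih (by omega) 
  | case3 lo hi h1 => intro m hm1 hm2; omega
  
-- from the result of the binary search up to hi, every element is > t (needs sortedness)
theorem bsearch_above (s : List Int) (t : Int) (lo hi : Nat)
    (hs : s.Pairwise (· ≤ ·)) (hhi : hi ≤ s.length) :
    ∀ m, bsearch s t lo hi ≤ m → m < hi → t < s.getD m 0 := by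
  fun_induction bsearch s t lo hi with
  | case1 lo hi h1 mid h2 ih => exact ih hhi
  | case2 lo hi h1 mid h2 ih =>
    intro m hm1 hm2
    by_cases hmid : m < mid
    · exact ih (by omega) m hm1 hmid
    · have hmlen : m < s.length := by omega
      have hmidlen : mid < s.length := by omega
      rw [List.getD_eq_getElem s 0 hmlen]
      rw [List.getD_eq_getElem s 0 hmidlen] at h2
      push_neg at h2
      rcases Nat.eq_or_lt_of_le (Nat.le_of_not_lt hmid) with h | h
      · simp only [← h]; exact h2
      · exact lt_of_lt_of_le h2 (List.pairwise_iff_getElem.mp hs mid m hmidlen hmlen h)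
  | case3 lo hi h1 => intro m hm1 hm2; omega

-- on a sorted list, the binary search finds the same boundary as the linear scan
theorem bsearch_eq_linScan (s : List Int) (k b : Int) (j : Nat)
    (hs : s.Pairwise (· ≤ ·)) (hj : j ≤ s.length) :
    bsearch s (b + k) (j) s.length = linScan s k b s.length j := by
  set B := bsearch s (b + k) j s.length with hB
  set L := linScan s k b s.length j with hL
  have hBge := bsearch_ge s (b + k) j s.length
  have hBle := bsearch_le s (b + k) j s.length hj
  have hLge := linScan_ge s k b s.length j
  have hLle := linScan_le s k b s.length j hj
  rcases Nat.lt_trichotomy B L with h | h | h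
  · -- B < L: then s[B] ≤ b + k by linScan_mem, but B < s.length so bsearch_above gives > 
    exfalso
    have h1 := linScan_mem s k b s.length j B hBge h
    have h2 := bsearch_above s (b + k) j s.length hs (le_refl _) B (le_refl _) (by omega)
    omega
  · exact h
  · -- L < B: s[L] ≤ b + k by bsearch_below, but linScan_stop says > k
    exfalso
    have h1 := bsearch_below s (b + k) j s.length hs (le_refl _) L hLge h
    have h2 := linScan_stop s k b s.length j (by omega)
    rw [← hL] at h2
    omega

-- proof-side flat outer loop over the linear boundary scan
def altOuter (s : List Int) (k : Int) (n i : Nat) (res : Int) : Int :=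
  if i < n then
    altOuter s k n (linScan s k (s.getD i 0) n (i + 1)) (res + 1)
  else res
termination_by n - i
decreasing_by
  have := linScan_ge s k (s.getD i 0) n (i + 1)
  omega

theorem outerB_eq_altOuter (s : List Int) (k : Int) (hs : s.Pairwise (· ≤ ·)) :
    ∀ (i : Nat) (res : Int), outerB s k s.length i res = altOuter s k s.length i res := by
  intro i res
  fun_induction outerB s k s.length i res with
  | case1 i res h ih =>
    rw [altOuter, if_pos h]
    rw [bsearch_eq_linScan s k (s.getD i 0) (i + 1) hs (by omega)] at ih ⊢
    exact ih
  | case2 i res h => rw [altOuter, if_neg h]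

theorem altOuter_eq_foldA (s : List Int) (k : Int) : ∀ (i : Nat) (res : Int),
    altOuter s k s.length i res =
      res + (if i < s.length then (foldA k (s.drop (i + 1)) (1, s.getD i 0)).1 else 0) := by
  intro i res
  fun_induction altOuter s k s.length i res with
  | case1 i res h ih =>
    rw [ih, if_pos h]
    rw [linScan_skip s k (s.getD i 0) (i + 1) 1]
    set j := linScan s k (s.getD i 0) s.length (i + 1) with hj
    by_cases hjn : j < s.length
    · have hstop := linScan_stop s k (s.getD i 0) s.length (i + 1) (hj ▸ hjn)
      rw [← hj] at hstop
      rw [List.getD_eq_getElem s 0 hjn] at hstop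
      rw [if_pos hjn, List.drop_eq_getElem_cons hjn]
      simp only [foldA, List.foldl_cons]
      rw [if_neg hstop]
      have hsh := foldA_shift k (s.drop (j + 1)) 1 (s[j])
      simp only [foldA] at hsh
      rw [List.getD_eq_getElem s 0 hjn, hsh]
      ring
    · have hjeq : j = s.length := by
        have := linScan_le s k (s.getD i 0) s.length (i + 1) (by omega)
        omega
      rw [if_neg hjn, hjeq, List.drop_length]
      simp [foldA]
  | case2 i res h => simp [h]

theorem sorted_ne_nil (nums : List Int) (h : nums ≠ []) :
    PySem.List.sorted nums (fun x => x) false ≠ [] := by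
  intro hc
  have := PySem.List.sorted_perm nums (fun x : Int => x) false
  rw [hc] at this
  exact h (List.Perm.nil_eq this).symm

-- A's fold when no element can join the anchor's group (k < 0, ascending input)
theorem foldA_neg (k : Int) (hk : k < 0) : ∀ (l : List Int) (cur r : Int),
    l.Pairwise (· ≤ ·) → (∀ x ∈ l, cur ≤ x) →
    (foldA k l (r, cur)).1 = r + (l.length : Int) := by
  intro l
  induction l with
  | nil => intro cur r _ _; simp [foldA]
  | cons x l ih =>
    intro cur r hp hcur
    have hx : cur ≤ x := hcur x (by simp)
    simp only [foldA, List.foldl_cons]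
    rw [if_neg (by omega)]
    have := ih x (r + 1) hp.of_cons (List.pairwise_cons.mp hp).1
    simp only [foldA] at this
    rw [this]
    simp only [List.length_cons]
    push_cast
    ring

-- the flat outer loop when every group is a singleton (k < 0, ascending list)
theorem altOuter_neg (s : List Int) (k : Int) (hk : k < 0) (hp : s.Pairwise (· ≤ ·)) :
    ∀ (i : Nat) (res : Int), altOuter s k s.length i res = res + ((s.length - i : Nat) : Int) := by
  intro i res
  fun_induction altOuter s k s.length i res with
  | case1 i res h ih =>
    have hji : linScan s k (s.getD i 0) s.length (i + 1) = i + 1 := by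
      rw [linScan]
      by_cases h1 : i + 1 < s.length
      · rw [if_pos h1]
        have hle : s[i] ≤ s[i + 1] :=
          List.pairwise_iff_getElem.mp hp i (i + 1) h h1 (by omega)
        rw [List.getD_eq_getElem s 0 h1, List.getD_eq_getElem s 0 h]
        rw [if_neg (by omega)]
      · rw [if_neg h1]
    simp only [hji] at ih ⊢
    rw [ih]
    have hlen : (s.length - i : Nat) = (s.length - (i + 1) : Nat) + 1 := by omega
    rw [hlen]
    push_cast
    ring
  | case2 i res h =>
    have hz : (s.length - i : Nat) = 0 := by omega
    simp [hz]

theorem partitionArray_eq_foldA (nums : List Int) (k : Int) (c : Int) (t : List Int)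
    (hs : PySem.List.sorted nums (fun x => x) false = c :: t) :
    partitionArray nums k = (foldA k (c :: t) (1, c)).1 := by
  simp only [partitionArray, hs, foldA]

theorem partitionArray_alt_eq_foldA (nums : List Int) (k : Int) (c : Int) (t : List Int)
    (hs : PySem.List.sorted nums (fun x => x) false = c :: t) :
    partitionArray_alt nums k = (foldA k t (1, c)).1 := by
  have hp : (PySem.List.sorted nums (fun x : Int => x) false).Pairwise (· ≤ ·) :=
    PySem.List.sorted_pairwise nums (fun x => x)
  simp only [partitionArray_alt, hs]
  rw [hs] at hp
  rw [outerB_eq_altOuter (c :: t) k hp 0 0]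
  rw [altOuter_eq_foldA (c :: t) k 0 0]
  simp [foldA]

-- ===== VERDICT (by name: the statement is the Claim_ definition above) =====
theorem partitionArray_spec : Claim_unchanged_partitionArray := by
  unfold Claim_unchanged_partitionArray
  intro nums k _ hpre hnd
  have hk : 0 ≤ k := by
    by_contra hk
    exact hnd ⟨hpre, by omega⟩
  obtain ⟨c, t, hs⟩ := List.exists_cons_of_ne_nil (sorted_ne_nil nums hpre)
  rw [partitionArray_eq_foldA nums k c t hs, partitionArray_alt_eq_foldA nums k c t hs]
  simp only [foldA, List.foldl_cons]
  rw [if_pos (by omega : c - c ≤ k)]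

theorem partitionArray_changed : Claim_changed_partitionArray := by
  unfold Claim_changed_partitionArray
  refine ⟨by decide, by decide, by decide, by decide, ?_, by decide⟩
  show partitionArray_alt [3] (-1) = 1
  have hs3 : PySem.List.sorted ([3] : List Int) (fun x => x) false = [3] := by decide
  simp only [partitionArray_alt, hs3]
  rw [outerB_eq_altOuter [3] (-1) (by simp) 0 0]
  rw [altOuter_neg [3] (-1) (by norm_num) (by simp) 0 0]
  decide

theorem partitionArray_tight : Claim_exact_partitionArray := by
  unfold Claim_exact_partitionArray
  intro nums k _ hpre hd
  obtain ⟨-, hk⟩ := hd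
  obtain ⟨c, t, hs⟩ := List.exists_cons_of_ne_nil (sorted_ne_nil nums hpre)
  have hp : (PySem.List.sorted nums (fun x : Int => x) false).Pairwise (· ≤ ·) :=
    PySem.List.sorted_pairwise nums (fun x => x)
  rw [hs] at hp
  have hA : partitionArray nums k = 1 + ((c :: t).length : Int) := by
    rw [partitionArray_eq_foldA nums k c t hs]
    refine foldA_neg k hk (c :: t) c 1 hp ?_
    intro x hx
    rcases List.mem_cons.mp hx with h | h
    · omega
    · exact (List.pairwise_cons.mp hp).1 x h
  have hB : partitionArray_alt nums k = ((c :: t).length : Int) := by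
    simp only [partitionArray_alt, hs]
    rw [outerB_eq_altOuter (c :: t) k hp 0 0]
    rw [altOuter_neg (c :: t) k hk hp 0 0]
    simp
  rw [hA, hB]
  omega
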